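-- pv_equiv track=rewrite | github.com/ntg2208/production-ai-customer-support | utils/chunking_data.py | _get_section_name
-- ===== SOURCE A (Python) =====
-- def _get_section_name(full_text: str, question: str) -> str:
--     """Determine which section a question belongs to"""
--     # Find the section header before this question
--     lines = full_text.split('\n')
--     question_line = -1
--
--     for i, line in enumerate(lines):
--         if question in line:
--             question_line = i
--             break
--
--     if question_line > 0:
--         # Look backwards for section header
--         for i in range(question_line, -1, -1):
--             if lines[i].startswith('##'):
--                 return lines[i].replace('##', '').strip()
--
--     return "General"
-- ===== SOURCE B (Python) =====
-- def _get_section_name(full_text: str, question: str) -> str: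
--     """Determine which section a question belongs to"""
--     # Single forward pass over the lines, tracking the most recent '##' header.
--     current = "General"
--     for line in full_text.split('\n'):
--         if line.startswith('##'):
--             current = line.replace('##', '').strip()
--         if question in line:
--             return current
--     return "General"
-- ===== Notes on version B (the rewrite author's own statement) =====
-- stated objective: simpler
-- what changed: Replaces the two-phase find-the-question-line-then-scan-backward-over-indices structure with one streaming forward pass over the lines that maintains the most recent section header, with no index arithmetic.
-- intended difference: When the question first matches on the very first line and that line is itself a '##' header (whose title is not 'General'), A's 'question_line > 0' guard makes it return 'General' and ignore that header, while B returns the header's name, which is the section the question actually belongs to. — e.g. on _get_section_name("## Pay\nx", "Pay"): A returns "General", B returns "Pay"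
import Mathlib
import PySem

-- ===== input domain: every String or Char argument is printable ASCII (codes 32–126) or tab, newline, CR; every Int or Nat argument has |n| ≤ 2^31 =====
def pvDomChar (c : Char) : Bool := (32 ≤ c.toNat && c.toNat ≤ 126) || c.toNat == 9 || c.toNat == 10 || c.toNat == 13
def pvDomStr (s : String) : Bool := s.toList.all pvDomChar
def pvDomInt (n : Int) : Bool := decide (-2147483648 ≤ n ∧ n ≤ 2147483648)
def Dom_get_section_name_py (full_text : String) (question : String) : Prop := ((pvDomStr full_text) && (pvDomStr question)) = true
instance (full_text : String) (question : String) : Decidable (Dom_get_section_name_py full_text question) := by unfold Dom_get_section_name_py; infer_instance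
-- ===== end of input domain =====

-- B is one streaming forward pass tracking the latest '##' header (objective: simpler);
-- it intentionally differs from A on the D_ corner stated below.

-- ===== PORT A =====
-- 'for i, line in enumerate(lines): if question in line: question_line = i; break' (question_line starts at -1)
def pvFindQ (question : String) : List (Int × String) → Int
  | [] => -1
  | (i, line) :: rest =>
      if PySem.Str.isIn question line then i else pvFindQ question rest

-- 'for i in range(question_line, -1, -1): if lines[i].startswith("##"): return lines[i].replace("##","").strip()'
-- lines[i] via pyGet?; the none branch is unreachable (every i in the range is in bounds) and just continues the loop.
def pvBackScan (lines : List String) : List Int → String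
  | [] => "General"
  | i :: is =>
      match PySem.List.pyGet? lines i with
      | some line =>
          if PySem.Str.startswith line "##" then PySem.Str.strip (PySem.Str.replace line "##" "")
          else pvBackScan lines is
      | none => pvBackScan lines is

def get_section_name_py (full_text : String) (question : String) : String :=
  let lines := (PySem.Str.split? full_text "\n").getD []
  let question_line := pvFindQ question (PySem.List.enumerate lines 0)
  if question_line > 0 then pvBackScan lines (PySem.List.pyRange question_line (-1) (-1))
  else "General"

-- ===== PORT B =====
-- one forward pass: 'current' = latest '##' header seen so far
def pvGo (question : String) : List String → String → String
  | [], _ => "General"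
  | line :: rest, current =>
      let current' := if PySem.Str.startswith line "##" then PySem.Str.strip (PySem.Str.replace line "##" "") else current
      if PySem.Str.isIn question line then current'
      else pvGo question rest current'

def get_section_name_py_alt (full_text : String) (question : String) : String :=
  pvGo question ((PySem.Str.split? full_text "\n").getD []) "General"

-- ===== PRECONDITION & SPEC =====
-- When the question first matches on the very first line and that line is itself a '##' header,
-- A's 'question_line > 0' guard returns "General" and ignores that header, while B returns the
-- header's name (which is not "General") — the section the question actually belongs to, the intended value.
def D_get_section_name_py (full_text : String) (question : String) : Prop :=
  let l0 := ((PySem.Str.split? full_text "\n").getD []).headD ""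
  PySem.Str.isIn question l0 = true ∧ PySem.Str.startswith l0 "##" = true ∧
    PySem.Str.strip (PySem.Str.replace l0 "##" "") ≠ "General"
instance (full_text : String) (question : String) : Decidable (D_get_section_name_py full_text question) := by unfold D_get_section_name_py; infer_instance

def Spec_get_section_name_py (full_text : String) (question : String) (out : String) : Prop :=
  ¬ D_get_section_name_py full_text question → out = get_section_name_py_alt full_text question
instance (full_text : String) (question : String) (out : String) : Decidable (Spec_get_section_name_py full_text question out) := by unfold Spec_get_section_name_py; infer_instance

def pvDiffWitness_get_section_name_py : String × String := ("## Pay\nx", "Pay")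
def pvDiffWitnessOut_get_section_name_py : String × String := ("General", "Pay")

-- ===== CLAIM =====
def Claim_unchanged_get_section_name_py : Prop := ∀ (full_text : String) (question : String), Dom_get_section_name_py full_text question → Spec_get_section_name_py full_text question (get_section_name_py full_text question)
def Claim_changed_get_section_name_py : Prop := Dom_get_section_name_py (pvDiffWitness_get_section_name_py.1) (pvDiffWitness_get_section_name_py.2) ∧ D_get_section_name_py (pvDiffWitness_get_section_name_py.1) (pvDiffWitness_get_section_name_py.2) ∧ get_section_name_py (pvDiffWitness_get_section_name_py.1) (pvDiffWitness_get_section_name_py.2) = pvDiffWitnessOut_get_section_name_py.1 ∧ get_section_name_py_alt (pvDiffWitness_get_section_name_py.1) (pvDiffWitness_get_section_name_py.2) = pvDiffWitnessOut_get_section_name_py.2 ∧ pvDiffWitnessOut_get_section_name_py.1 ≠ pvDiffWitnessOut_get_section_name_py.2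
def Claim_exact_get_section_name_py : Prop := ∀ (full_text : String) (question : String), Dom_get_section_name_py full_text question → D_get_section_name_py full_text question → get_section_name_py full_text question ≠ get_section_name_py_alt full_text question

-- ===== LEMMAS AND PROOFS =====

-- the header-tracking step shared by both programs
def pvUpd (current line : String) : String :=
  if PySem.Str.startswith line "##" then PySem.Str.strip (PySem.Str.replace line "##" "") else current

-- the latest header in a processed prefix (B's 'current' after the prefix)
def pvLast (pre : List String) : String := pre.foldl pvUpd "General"

lemma pvLast_append_singleton (pre : List String) (l : String) :
    pvLast (pre ++ [l]) = pvUpd (pvLast pre) l := by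
  simp [pvLast]

-- A's backward scan from the last index of `pre` (inside pre ++ suffix) finds exactly B's tracked header
lemma pvBackScan_eq (suffix pre : List String) :
    pvBackScan (pre ++ suffix) (PySem.List.pyRange ((pre.length : Int) - 1) (-1) (-1)) = pvLast pre := by
  induction pre using List.reverseRecOn generalizing suffix with
  | nil =>
      rw [PySem.List.pyRange_neg_one_eq_nil (by norm_num)]
      simp [pvBackScan, pvLast]
  | append_singleton p x ih =>
      have hlen : ((p ++ [x]).length : Int) - 1 = (p.length : Int) := by simp
      rw [hlen, PySem.List.pyRange_neg_one_cons (by omega), List.append_assoc]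
      have hidx : p.length < (p ++ ([x] ++ suffix)).length := by simp
      have hget : PySem.List.pyGet? (p ++ ([x] ++ suffix)) ((p.length : Int)) = some x := by
        rw [PySem.List.pyGet?_ofNat _ _ hidx]
        simp
      rw [pvBackScan, hget, pvLast_append_singleton]
      unfold pvUpd
      split
      next line heq =>
        cases heq
        split_ifs
        · rfl
        · exact ih ([x] ++ suffix)
      next heq => exact absurd heq (by simp)

-- main bridge: A's two-phase computation on pre ++ t, for a NONEMPTY processed prefix pre,
-- equals B's streaming pass over t with 'current' = pvLast pre
lemma pvMain (question : String) : ∀ (t pre : List String), pre ≠ [] →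
    (if pvFindQ question (PySem.List.enumerate t (pre.length : Int)) > 0
     then pvBackScan (pre ++ t)
       (PySem.List.pyRange (pvFindQ question (PySem.List.enumerate t (pre.length : Int))) (-1) (-1))
     else "General")
    = pvGo question t (pvLast pre) := by
  intro t
  induction t with
  | nil => intro pre _; simp [pvFindQ, pvGo]
  | cons l ls ih =>
      intro pre hpre
      rw [PySem.List.enumerate_cons]
      by_cases hq : PySem.Str.isIn question l = true
      · rw [pvFindQ, if_pos hq]
        have hpos : (0 : Int) < ((pre.length : Nat) : Int) := by
          rcases pre with _ | _
          · exact absurd rfl hpre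
          · exact_mod_cast Nat.succ_pos _
        rw [if_pos hpos]
        have hlen : ((pre.length : Nat) : Int) = ((pre ++ [l]).length : Int) - 1 := by simp
        have happ : pre ++ l :: ls = (pre ++ [l]) ++ ls := by simp
        rw [hlen, happ, pvBackScan_eq ls (pre ++ [l]), pvLast_append_singleton]
        conv_rhs => rw [pvGo]
        rw [if_pos hq]
        simp [pvUpd]
      · rw [pvFindQ, if_neg hq]
        have hlen : ((pre.length : Int) + 1) = (((pre ++ [l]).length : Nat) : Int) := by simp
        have happ : pre ++ l :: ls = (pre ++ [l]) ++ ls := by simp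
        rw [hlen, happ, ih (pre ++ [l]) (by simp), pvLast_append_singleton]
        conv_rhs => rw [pvGo]
        rw [if_neg hq]
        simp [pvUpd]

-- top-level bridge over an explicit line list
lemma pvTop (question : String) (lines : List String)
    (hD : ¬(PySem.Str.isIn question (lines.headD "") = true ∧ PySem.Str.startswith (lines.headD "") "##" = true ∧
        PySem.Str.strip (PySem.Str.replace (lines.headD "") "##" "") ≠ "General")) :
    (if pvFindQ question (PySem.List.enumerate lines 0) > 0
     then pvBackScan lines (PySem.List.pyRange (pvFindQ question (PySem.List.enumerate lines 0)) (-1) (-1))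
     else "General") = pvGo question lines "General" := by
  rcases lines with _ | ⟨l0, ls⟩
  · simp [pvFindQ, pvGo, PySem.List.enumerate]
  · simp only [List.headD_cons] at hD
    rw [PySem.List.enumerate_cons]
    by_cases hq : PySem.Str.isIn question l0 = true
    · rw [pvFindQ, if_pos hq, if_neg (by omega)]
      conv_rhs => rw [pvGo]
      rw [if_pos hq]
      by_cases hs : PySem.Str.startswith l0 "##" = true
      · have hg : PySem.Str.strip (PySem.Str.replace l0 "##" "") = "General" := by
          by_contra hne
          exact hD ⟨hq, hs, hne⟩
        rw [if_pos hs, hg]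
      · rw [if_neg hs]
    · rw [pvFindQ, if_neg hq]
      have h := pvMain question ls [l0] (by simp)
      simp only [List.length_cons, List.length_nil, List.singleton_append] at h
      rw [show ((0:Int) + 1) = (((1:Nat)) : Int) by norm_num]
      rw [h]
      rw [pvGo, if_neg hq]
      simp [pvLast, pvUpd]

-- ===== VERDICT =====
theorem get_section_name_py_spec : Claim_unchanged_get_section_name_py := by
  intro full_text question _ hD
  unfold D_get_section_name_py at hD
  exact pvTop question ((PySem.Str.split? full_text "\n").getD []) hD

theorem get_section_name_py_changed : Claim_changed_get_section_name_py := by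
  unfold Claim_changed_get_section_name_py; decide

theorem get_section_name_py_tight : Claim_exact_get_section_name_py := by
  intro full_text question _ hD
  unfold D_get_section_name_py at hD
  unfold get_section_name_py get_section_name_py_alt
  rcases hlines : (PySem.Str.split? full_text "\n").getD [] with _ | ⟨l0, ls⟩
  · rw [hlines] at hD
    simp only [List.headD_nil] at hD
    exact absurd hD.2.1 (by decide)
  · rw [hlines] at hD
    simp only [List.headD_cons] at hD
    obtain ⟨hq, hs, hne⟩ := hD
    show (if pvFindQ question (PySem.List.enumerate (l0 :: ls) 0) > 0 then _ else "General") ≠ _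
    rw [PySem.List.enumerate_cons, pvFindQ, if_pos hq, if_neg (by omega)]
    conv_rhs => rw [pvGo]
    rw [if_pos hq, if_pos hs]
    exact fun h => hne h.symm
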